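-- pv_equiv track=rewrite | github.com/RzMY/Study | Algorithms/course/C4/1.2.py | optimal_segmentation
-- ===== SOURCE A (Python) =====
-- def optimal_segmentation(P):
--     n = len(P)
--     dp = [0] + [float('inf')] * n  # 初始化动态规划数组，dp[i]表示前i个元素的最小存储位数
--     segmentation = [0] * (n + 1)   # 记录分割位置
--
--     # 遍历每一个位置，寻找最优分割点
--     for i in range(1, n + 1):
--         for j in range(i):
--             bits, segments = calculate_bits(P[j:i])  # 计算当前段的存储位数
--             if dp[j] + bits < dp[i]:
--                 dp[i] = dp[j] + bits
--                 segmentation[i] = j  # 更新分割点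
--
--     segments = []
--     i = n
--     # 根据分割点重构分段方案
--     while i > 0:
--         segments.insert(0, P[segmentation[i]:i])
--         i = segmentation[i]
--
--     return segments, dp[n]
--
-- def calculate_bits(segment):
--     max_val = max(segment)  # 找到当前段的最大值
--     bits_per_element = max_val.bit_length()  # 计算每个元素需要的位数
--     segment_bits = len(segment) * bits_per_element  # 当前段所有元素的总位数
--     overhead = 11  # 每段的存储开销位数
--     total_bits = segment_bits + overhead  # 当前段的总存储位数
--     return total_bits, segment
-- ===== SOURCE B (Python) =====
-- def optimal_segmentation(P):
--     n = len(P)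
--     dp = [0]            # dp[i] = min bits for P[:i]; only ints, never inf
--     seg = [0]           # seg[i] = start of last segment in an optimal split of P[:i]
--     for i in range(1, n + 1):
--         # one backward pass: running max of P[j:i] gives each segment cost in O(1)
--         mx = P[i - 1]
--         best = None
--         bj = 0
--         for j in range(i - 1, -1, -1):
--             if P[j] > mx:
--                 mx = P[j]
--             c = dp[j] + (i - j) * mx.bit_length() + 11
--             # '<=' while scanning j downward keeps the smallest minimizing j,
--             # matching the forward strict '<' tie-break of the classic DP
--             if best is None or c <= best:
--                 best = c
--                 bj = j
--         dp.append(best if best is not None else 0)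
--         seg.append(bj)
--     out = []
--     i = n
--     while i > 0:
--         out.append(P[seg[i]:i])
--         i = seg[i]
--     out.reverse()
--     return out, dp[-1]
-- ===== Notes on version B (the rewrite author's own statement) =====
-- stated objective: faster
-- what changed: Replaces the O(n) max()-scan per (j,i) pair by a single backward pass per i that threads a running maximum, computing each segment cost in O(1) and selecting the best split point in the same pass (<= while descending reproduces A's first-minimum tie-break); dp is grown by append with no float('inf') sentinel.
import Mathlib
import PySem

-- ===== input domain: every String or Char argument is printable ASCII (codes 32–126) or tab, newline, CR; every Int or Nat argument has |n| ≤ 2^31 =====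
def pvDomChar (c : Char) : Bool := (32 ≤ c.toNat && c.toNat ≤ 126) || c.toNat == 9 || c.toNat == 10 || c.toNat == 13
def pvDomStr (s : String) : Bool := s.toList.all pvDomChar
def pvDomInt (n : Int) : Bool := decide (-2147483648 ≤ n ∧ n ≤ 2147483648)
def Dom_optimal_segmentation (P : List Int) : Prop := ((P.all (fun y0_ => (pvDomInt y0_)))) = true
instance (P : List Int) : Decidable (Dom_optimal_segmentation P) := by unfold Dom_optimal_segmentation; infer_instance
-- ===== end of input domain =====

-- B replaces A's O(n) max()-scan per (j,i) pair by one backward pass per i threading a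
-- running maximum (segment cost in O(1)), selecting the split point in the same pass:
-- O(n^2) instead of O(n^3), measurably faster on large inputs.


-- ===== PORT A =====
-- max(segment): max? with identity key; segment is nonempty at every call site (j < i), so getD 0 never fires
def calculate_bits (segment : List Int) : Int × List Int :=
  let max_val := (PySem.List.max? segment (fun y => y)).getD 0
  let bits_per_element := (PySem.Int.bitLength max_val : Int)
  let segment_bits := (segment.length : Int) * bits_per_element
  (segment_bits + 11, segment)

-- float('inf') lives only in dp: model dp entries as Option Int, none = inf
def pvOAdd (a : Option Int) (b : Int) : Option Int := a.map (· + b)   -- inf + b = inf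
def pvOLt : Option Int → Option Int → Bool
  | none, _ => false                -- inf < _  is False
  | some _, none => true            -- x < inf  is True
  | some x, some y => decide (x < y)

-- while i > 0: segments.insert(0, P[seg[i]:i]); i = seg[i]  — fuel n+1 only makes the
-- recursion structural; every reached seg[i] is < i, so the fuel is never exhausted
def pvRebuildA (P : List Int) (seg : List Nat) : Nat → Nat → List (List Int) → List (List Int)
  | 0, _, acc => acc
  | fuel+1, i, acc =>
    if 0 < i then
      pvRebuildA P seg fuel (seg.getD i 0)
        (PySem.List.slice P (some ((seg.getD i 0 : Nat) : Int)) (some (i : Int)) :: acc)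
    else acc

def optimal_segmentation (P : List Int) : List (List Int) × Int :=
  let n := P.length
  let dp0 : List (Option Int) := some 0 :: List.replicate n none
  let seg0 : List Nat := List.replicate (n + 1) 0
  let st := (List.range n).foldl (fun (st : List (Option Int) × List Nat) i' =>
      let i := i' + 1
      (List.range i).foldl (fun (st : List (Option Int) × List Nat) (j : Nat) =>
        let dp := st.1
        let seg := st.2
        let bs := calculate_bits (PySem.List.slice P (some (j : Int)) (some (i : Int)))
        let cand := pvOAdd (dp.getD j none) bs.1
        if pvOLt cand (dp.getD i none) then (dp.set i cand, seg.set i j) else st) st)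
    (dp0, seg0)
  let segments := pvRebuildA P st.2 (n + 1) n []
  (segments, (st.1.getD n none).getD 0)   -- dp[n] is always a finite int (set at j = 0 when i = n)

-- ===== PORT B =====
-- inner loop of B: j runs i-1, i-2, …, 0 (fuel jp+1 means “next j is jp”); state (mx, best, bj)
def pvInnerB (P : List Int) (dp : List Int) (i : Nat) : Nat → Int → Option Int → Nat → Option Int × Nat
  | 0, _, best, bj => (best, bj)
  | jp+1, mx, best, bj =>
    let mx' := if mx < P.getD jp 0 then P.getD jp 0 else mx        -- if P[j] > mx: mx = P[j]
    let c := dp.getD jp 0 + ((i - jp : Nat) : Int) * (PySem.Int.bitLength mx' : Int) + 11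
    if (match best with | none => true | some b => decide (c ≤ b)) then
      pvInnerB P dp i jp mx' (some c) jp
    else
      pvInnerB P dp i jp mx' best bj

-- out.append(...) while i > 0, then out.reverse() at the end (same fuel device as A's port)
def pvRebuildB (P : List Int) (seg : List Nat) : Nat → Nat → List (List Int) → List (List Int)
  | 0, _, acc => acc
  | fuel+1, i, acc =>
    if 0 < i then
      pvRebuildB P seg fuel (seg.getD i 0)
        (acc ++ [PySem.List.slice P (some ((seg.getD i 0 : Nat) : Int)) (some (i : Int))])
    else acc

def optimal_segmentation_alt (P : List Int) : List (List Int) × Int :=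
  let n := P.length
  let st := (List.range n).foldl (fun (st : List Int × List Nat) i' =>
      let i := i' + 1
      let r := pvInnerB P st.1 i i (P.getD (i - 1) 0) none 0
      (st.1 ++ [r.1.getD 0], st.2 ++ [r.2])) ([0], [0])   -- best is never None when the loop ran
  let out := pvRebuildB P st.2 (n + 1) n []
  (out.reverse, st.1.getD (st.1.length - 1) 0)            -- dp[-1]

-- ===== PRECONDITION & SPEC =====
def Spec_optimal_segmentation (P : List Int) (out : List (List Int) × Int) : Prop := out = optimal_segmentation_alt P
instance (P : List Int) (out : List (List Int) × Int) : Decidable (Spec_optimal_segmentation P out) := by unfold Spec_optimal_segmentation; infer_instance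

-- ===== CLAIM (what is proved, stated in full; the proofs are below) =====
def Claim_equal_optimal_segmentation : Prop := ∀ (P : List Int), Dom_optimal_segmentation P → Spec_optimal_segmentation P (optimal_segmentation P)

-- ===== LEMMAS AND PROOFS =====

-- max of the slice P[j:i], by downward recursion on j (the order B's running max visits it)
def pvM (P : List Int) (i j : Nat) : Int :=
  if _h : j + 1 < i then max (P.getD j 0) (pvM P i (j+1)) else P.getD j 0
termination_by i - j

-- first minimum (value, least argmin) of candidates c 0 .. c k
def pvMJ (c : Nat → Int) : Nat → Int × Nat
  | 0 => (c 0, 0)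
  | k+1 => let p := pvMJ c k; if c (k+1) < p.1 then (c (k+1), k+1) else p

-- the Python 'best is None or c <= best' condition
def pvCond (c : Int) (best : Option Int) : Bool :=
  match best with | none => true | some b => decide (c ≤ b)

-- B's inner loop with the running max already replaced by pvM (pure selection, descending, ≤)
def pvSelB (c : Nat → Int) : Nat → Option Int → Nat → Option Int × Nat
  | 0, best, bj => (best, bj)
  | jp+1, best, bj =>
    if pvCond (c jp) best then
      pvSelB c jp (some (c jp)) jp
    else
      pvSelB c jp best bj

-- the common candidate function at stage i (dpv = B's dp list so far)
def pvC (P : List Int) (dpv : List Int) (i : Nat) (j : Nat) : Int :=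
  dpv.getD j 0 + ((i - j : Nat) : Int) * (PySem.Int.bitLength (pvM P i j) : Int) + 11

lemma pvFoldlMaxMax (l : List Int) (a x : Int) :
    l.foldl max (max a x) = max a (l.foldl max x) := List.foldl_assoc

lemma pvSliceEq (P : List Int) (i j : Nat) :
    PySem.List.slice P (some (j : Int)) (some (i : Int)) = (P.drop j).take (i - j) := by
  rw [PySem.List.slice_natCast]

lemma pvSliceCons (P : List Int) (i j : Nat) (hj : j < i) (hn : j < P.length) :
    (P.drop j).take (i - j) = P.getD j 0 :: (P.drop (j+1)).take (i - (j+1)) := by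
  rw [List.drop_eq_getElem_cons hn]
  have h1 : i - j = (i - (j+1)) + 1 := by omega
  rw [h1, List.take_succ_cons, List.getD_eq_getElem?_getD, List.getElem?_eq_getElem hn]
  rfl

lemma pvMaxSlice (P : List Int) (i j : Nat) (hj : j < i) (hi : i ≤ P.length) :
    PySem.List.max? ((P.drop j).take (i - j)) (fun y => y) = some (pvM P i j) := by
  rcases Nat.lt_or_ge (j+1) i with h|h
  · have ih := pvMaxSlice P i (j+1) h hi
    rw [pvSliceCons P i (j+1) h (by omega)] at ih
    rw [PySem.List.max?_id_cons] at ih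
    have h3 := Option.some.inj ih
    rw [pvSliceCons P i j hj (by omega), pvSliceCons P i (j+1) h (by omega)]
    rw [PySem.List.max?_id_cons]
    simp only [List.foldl_cons]
    rw [pvFoldlMaxMax, h3]
    conv_rhs => rw [pvM]
    rw [dif_pos h]
  · have h0 : i - (j+1) = 0 := by omega
    rw [pvSliceCons P i j hj (by omega), h0, List.take_zero, PySem.List.max?_id_cons]
    simp only [List.foldl_nil]
    conv_rhs => rw [pvM]
    rw [dif_neg (by omega)]
termination_by i - j

lemma pvBitsEq (P : List Int) (i j : Nat) (hj : j < i) (hi : i ≤ P.length) :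
    (calculate_bits (PySem.List.slice P (some (j : Int)) (some (i : Int)))).1
      = ((i - j : Nat) : Int) * (PySem.Int.bitLength (pvM P i j) : Int) + 11 := by
  rw [pvSliceEq]
  unfold calculate_bits
  rw [pvMaxSlice P i j hj hi]
  simp only [Option.getD_some, List.length_take, List.length_drop]
  have : min (i - j) (P.length - j) = i - j := by omega
  rw [this]

-- A's selection: ascending fold with strict < starting from (inf, 0) finds the first minimum
lemma pvSelA (c : Nat → Int) (k : Nat) :
    (List.range (k+1)).foldl
      (fun (st : Option Int × Nat) j => if pvOLt (some (c j)) st.1 then (some (c j), j) else st)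
      (none, 0)
      = (some (pvMJ c k).1, (pvMJ c k).2) := by
  induction k with
  | zero =>
    simp [pvMJ, pvOLt]
  | succ k ih =>
    rw [List.range_succ, List.foldl_append, ih]
    simp only [List.foldl_cons, List.foldl_nil, pvOLt, pvMJ]
    by_cases h : c (k+1) < (pvMJ c k).1 <;> simp [h]

-- B's selection: descending fold with ≤
lemma pvSelBSome (c : Nat → Int) (k : Nat) : ∀ (b : Int) (bj : Nat),
    pvSelB c (k+1) (some b) bj
      = (if (pvMJ c k).1 ≤ b then (some (pvMJ c k).1, (pvMJ c k).2) else (some b, bj)) := by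
  induction k with
  | zero =>
    intro b bj
    have step : pvSelB c 1 (some b) bj
        = (if decide (c 0 ≤ b) = true then pvSelB c 0 (some (c 0)) 0 else pvSelB c 0 (some b) bj) := rfl
    rw [step]
    simp only [pvSelB, pvMJ]
    by_cases h : c 0 ≤ b <;> simp [h]
  | succ k ih =>
    intro b bj
    have step : pvSelB c (k+1+1) (some b) bj
        = (if decide (c (k+1) ≤ b) = true then pvSelB c (k+1) (some (c (k+1))) (k+1)
           else pvSelB c (k+1) (some b) bj) := rfl
    rw [step]
    by_cases h : c (k+1) ≤ b
    · rw [if_pos (by simp [h]), ih]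
      simp only [pvMJ]
      by_cases h2 : c (k+1) < (pvMJ c k).1
      · rw [if_neg (by omega), if_pos (by simp [h2]; omega)]
        simp [h2]
      · rw [if_pos (by omega), if_pos (by simp [h2]; omega)]
        simp [h2]
    · rw [if_neg (by simp [h]), ih]
      simp only [pvMJ]
      by_cases h2 : c (k+1) < (pvMJ c k).1
      · rw [if_neg (by omega), if_neg (by simp [h2]; omega)]
      · by_cases h3 : (pvMJ c k).1 ≤ b
        · rw [if_pos h3, if_pos (by simp [h2]; omega)]
          simp [h2]
        · rw [if_neg h3, if_neg (by simp [h2]; omega)]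

lemma pvSelBNone (c : Nat → Int) (k : Nat) :
    pvSelB c (k+1) none 0 = (some (pvMJ c k).1, (pvMJ c k).2) := by
  cases k with
  | zero => simp [pvSelB, pvMJ, pvCond]
  | succ k =>
    have step : pvSelB c (k+1+1) none 0 = pvSelB c (k+1) (some (c (k+1))) (k+1) := rfl
    rw [step, pvSelBSome]
    simp only [pvMJ]
    by_cases h : c (k+1) < (pvMJ c k).1
    · rw [if_neg (by omega)]
      simp [h]
    · rw [if_pos (by omega)]
      simp [h]

-- threading the running max: B's inner loop is pvSelB on the candidates pvC
lemma pvInnerBEq (P : List Int) (dp : List Int) (i : Nat) :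
    ∀ (k : Nat) (mx : Int) (best : Option Int) (bj : Nat), k < i →
    max (P.getD k 0) mx = pvM P i k →
    pvInnerB P dp i (k+1) mx best bj = pvSelB (pvC P dp i) (k+1) best bj := by
  intro k
  induction k with
  | zero =>
    intro mx best bj _ hmx
    have hmx' : (if mx < P.getD 0 0 then P.getD 0 0 else mx) = pvM P i 0 := by
      rw [← hmx]
      rcases lt_or_ge mx (P.getD 0 0) with h|h
      · rw [if_pos h, max_eq_left (le_of_lt h)]
      · rw [if_neg (not_lt.2 h), max_eq_right h]
    have stepL : pvInnerB P dp i 1 mx best bj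
        = (if pvCond (dp.getD 0 0 + ((i - 0 : Nat) : Int) *
                   (PySem.Int.bitLength (if mx < P.getD 0 0 then P.getD 0 0 else mx) : Int) + 11) best = true
           then (some (dp.getD 0 0 + ((i - 0 : Nat) : Int) *
                   (PySem.Int.bitLength (if mx < P.getD 0 0 then P.getD 0 0 else mx) : Int) + 11), 0)
           else (best, bj)) := rfl
    rw [stepL, hmx']
    rfl
  | succ k ih =>
    intro mx best bj hk hmx
    have hmx' : (if mx < P.getD (k+1) 0 then P.getD (k+1) 0 else mx) = pvM P i (k+1) := by
      rw [← hmx]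
      rcases lt_or_ge mx (P.getD (k+1) 0) with h|h
      · rw [if_pos h, max_eq_left (le_of_lt h)]
      · rw [if_neg (not_lt.2 h), max_eq_right h]
    have hrec : max (P.getD k 0) (pvM P i (k+1)) = pvM P i k := by
      conv_rhs => rw [pvM]
      rw [dif_pos (by omega)]
    have stepL : pvInnerB P dp i (k+1+1) mx best bj
        = (if pvCond (dp.getD (k+1) 0 + ((i - (k+1) : Nat) : Int) *
                   (PySem.Int.bitLength (if mx < P.getD (k+1) 0 then P.getD (k+1) 0 else mx) : Int) + 11) best = true
           then pvInnerB P dp i (k+1) (if mx < P.getD (k+1) 0 then P.getD (k+1) 0 else mx)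
                  (some (dp.getD (k+1) 0 + ((i - (k+1) : Nat) : Int) *
                    (PySem.Int.bitLength (if mx < P.getD (k+1) 0 then P.getD (k+1) 0 else mx) : Int) + 11)) (k+1)
           else pvInnerB P dp i (k+1) (if mx < P.getD (k+1) 0 then P.getD (k+1) 0 else mx) best bj) := rfl
    have stepR : pvSelB (pvC P dp i) (k+1+1) best bj
        = (if pvCond (pvC P dp i (k+1)) best = true
           then pvSelB (pvC P dp i) (k+1) (some (pvC P dp i (k+1))) (k+1)
           else pvSelB (pvC P dp i) (k+1) best bj) := rfl
    rw [stepL, hmx', stepR]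
    have hc : dp.getD (k+1) 0 + ((i - (k+1) : Nat) : Int) *
        (PySem.Int.bitLength (pvM P i (k+1)) : Int) + 11 = pvC P dp i (k+1) := rfl
    rw [hc]
    split
    · exact ih (pvM P i (k+1)) _ _ (by omega) hrec
    · exact ih (pvM P i (k+1)) _ _ (by omega) hrec

-- factoring A's inner loop: it only writes position i, and reads j ≠ i from the untouched list
lemma pvInnerAFactor (P : List Int) (i : Nat) :
    ∀ (L : List Nat) (dp0 : List (Option Int)) (seg0 : List Nat) (b : Option Int) (s : Nat),
    (∀ j ∈ L, j ≠ i) → i < dp0.length → i < seg0.length →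
    L.foldl (fun (st : List (Option Int) × List Nat) (j : Nat) =>
        let dp := st.1
        let seg := st.2
        let bs := calculate_bits (PySem.List.slice P (some (j : Int)) (some (i : Int)))
        let cand := pvOAdd (dp.getD j none) bs.1
        if pvOLt cand (dp.getD i none) then (dp.set i cand, seg.set i j) else st)
      (dp0.set i b, seg0.set i s)
      = (dp0.set i (L.foldl (fun (bs : Option Int × Nat) j =>
            let cand := pvOAdd (dp0.getD j none) (calculate_bits (PySem.List.slice P (some (j : Int)) (some (i : Int)))).1
            if pvOLt cand bs.1 then (cand, j) else bs) (b, s)).1,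
         seg0.set i (L.foldl (fun (bs : Option Int × Nat) j =>
            let cand := pvOAdd (dp0.getD j none) (calculate_bits (PySem.List.slice P (some (j : Int)) (some (i : Int)))).1
            if pvOLt cand bs.1 then (cand, j) else bs) (b, s)).2) := by
  intro L
  induction L with
  | nil => intro dp0 seg0 b s _ _ _; rfl
  | cons j L ih =>
    intro dp0 seg0 b s hL hdp hseg
    have hj : j ≠ i := hL j (by simp)
    have hread_j : (dp0.set i b).getD j none = dp0.getD j none := by
      simp [List.getD_eq_getElem?_getD, List.getElem?_set_ne (Ne.symm hj)]
    have hread_i : (dp0.set i b).getD i none = b := by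
      simp [List.getD_eq_getElem?_getD, hdp]
    simp only [List.foldl_cons]
    simp only [hread_j, hread_i, List.set_set]
    by_cases hc : pvOLt (pvOAdd (dp0.getD j none)
        (calculate_bits (PySem.List.slice P (some (j : Int)) (some (i : Int)))).1) b = true
    · simp only [if_pos hc]
      exact ih dp0 seg0 _ j (fun x hx => hL x (by simp [hx])) hdp hseg
    · simp only [if_neg hc]
      exact ih dp0 seg0 b s (fun x hx => hL x (by simp [hx])) hdp hseg

-- the simulation invariant between A's state and B's state after i outer iterations
def pvInv (n i : Nat) (stA : List (Option Int) × List Nat) (stB : List Int × List Nat) : Prop :=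
  stA.1.length = n + 1 ∧ stA.2.length = n + 1 ∧ stB.1.length = i + 1 ∧ stB.2.length = i + 1 ∧
  (∀ k, stA.1.getD k none = if k ≤ i then some (stB.1.getD k 0) else none) ∧
  (∀ k, stA.2.getD k 0 = stB.2.getD k 0)

lemma pvStep (P : List Int) (m : Nat) (stA : List (Option Int) × List Nat) (stB : List Int × List Nat)
    (hm : m + 1 ≤ P.length) (h : pvInv P.length m stA stB) :
    pvInv P.length (m+1)
      ((fun (st : List (Option Int) × List Nat) i' =>
        let i := i' + 1
        (List.range i).foldl (fun (st : List (Option Int) × List Nat) (j : Nat) =>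
          let dp := st.1
          let seg := st.2
          let bs := calculate_bits (PySem.List.slice P (some (j : Int)) (some (i : Int)))
          let cand := pvOAdd (dp.getD j none) bs.1
          if pvOLt cand (dp.getD i none) then (dp.set i cand, seg.set i j) else st) st) stA m)
      ((fun (st : List Int × List Nat) i' =>
        let i := i' + 1
        let r := pvInnerB P st.1 i i (P.getD (i - 1) 0) none 0
        (st.1 ++ [r.1.getD 0], st.2 ++ [r.2])) stB m) := by
  obtain ⟨hA1, hA2, hB1, hB2, hdp, hseg⟩ := h
  have hxnone : stA.1.getD (m+1) none = none := by rw [hdp, if_neg (by omega)]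
  have hx : stA.1.set (m+1) none = stA.1 := by
    have h1 : m + 1 < stA.1.length := by omega
    have h2 : stA.1[m+1] = none := by
      rw [List.getD_eq_getElem?_getD, List.getElem?_eq_getElem h1] at hxnone
      simpa using hxnone
    conv_lhs => rw [← h2]
    exact List.set_getElem_self h1
  have hs0 : stA.2.getD (m+1) 0 = 0 := by
    rw [hseg]; exact List.getD_eq_default _ _ (by omega)
  have hy : stA.2.set (m+1) 0 = stA.2 := by
    have h1 : m + 1 < stA.2.length := by omega
    have h2 : stA.2[m+1] = 0 := by
      rw [List.getD_eq_getElem?_getD, List.getElem?_eq_getElem h1] at hs0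
      simpa using hs0
    conv_lhs => rw [← h2]
    exact List.set_getElem_self h1
  have hfact := pvInnerAFactor P (m+1) (List.range (m+1)) stA.1 stA.2 none 0
      (by intro x hx; simp [List.mem_range] at hx; omega) (by omega) (by omega)
  have eA : (fun (st : List (Option Int) × List Nat) i' =>
        let i := i' + 1
        (List.range i).foldl (fun (st : List (Option Int) × List Nat) (j : Nat) =>
          let dp := st.1
          let seg := st.2
          let bs := calculate_bits (PySem.List.slice P (some (j : Int)) (some (i : Int)))
          let cand := pvOAdd (dp.getD j none) bs.1
          if pvOLt cand (dp.getD i none) then (dp.set i cand, seg.set i j) else st) st) stA m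
      = (List.range (m+1)).foldl (fun (st : List (Option Int) × List Nat) (j : Nat) =>
          let dp := st.1
          let seg := st.2
          let bs := calculate_bits (PySem.List.slice P (some (j : Int)) (some ((m+1 : Nat) : Int)))
          let cand := pvOAdd (dp.getD j none) bs.1
          if pvOLt cand (dp.getD (m+1) none) then (dp.set (m+1) cand, seg.set (m+1) j) else st)
          (stA.1.set (m+1) none, stA.2.set (m+1) 0) := by
    rw [hx, hy]
  have hcong : (List.range (m+1)).foldl (fun (bs : Option Int × Nat) (j : Nat) =>
        let cand := pvOAdd (stA.1.getD j none)
          (calculate_bits (PySem.List.slice P (some (j : Int)) (some ((m+1 : Nat) : Int)))).1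
        if pvOLt cand bs.1 then (cand, j) else bs) ((none : Option Int), (0 : Nat))
      = (List.range (m+1)).foldl (fun (st : Option Int × Nat) (j : Nat) =>
          if pvOLt (some (pvC P stB.1 (m+1) j)) st.1
          then (some (pvC P stB.1 (m+1) j), j) else st) ((none : Option Int), (0 : Nat)) := by
    apply PySem.List.foldl_congr_mem
    intro acc x hxm
    simp only [List.mem_range] at hxm
    have hdx : stA.1.getD x none = some (stB.1.getD x 0) := by
      rw [hdp, if_pos (by omega)]
    have hb := pvBitsEq P (m+1) x (by omega) (by omega)
    simp only [hdx, hb, pvOAdd, Option.map_some, pvC, ← add_assoc]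
  have hmx : max (P.getD m 0) (P.getD m 0) = pvM P (m+1) m := by
    conv_rhs => rw [pvM]
    rw [dif_neg (by omega)]
    exact max_self _
  have hinner := pvInnerBEq P stB.1 (m+1) m (P.getD m 0) none 0 (by omega) hmx
  have eB : (fun (st : List Int × List Nat) i' =>
        let i := i' + 1
        let r := pvInnerB P st.1 i i (P.getD (i - 1) 0) none 0
        (st.1 ++ [r.1.getD 0], st.2 ++ [r.2])) stB m
      = (stB.1 ++ [(pvInnerB P stB.1 (m+1) (m+1) (P.getD m 0) none 0).1.getD 0],
         stB.2 ++ [(pvInnerB P stB.1 (m+1) (m+1) (P.getD m 0) none 0).2]) := rfl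
  rw [eA, hfact, hcong, pvSelA (pvC P stB.1 (m+1)) m, eB, hinner, pvSelBNone]
  simp only [Option.getD_some]
  refine ⟨by simp [hA1], by simp [hA2], by simp [hB1], by simp [hB2], ?_, ?_⟩
  · intro k
    rcases Nat.lt_trichotomy k (m+1) with hk|hk|hk
    · have e1 : (stA.1.set (m+1) (some (pvMJ (pvC P stB.1 (m+1)) m).1)).getD k none
          = stA.1.getD k none := by
        simp [List.getD_eq_getElem?_getD, List.getElem?_set_ne (by omega : (m+1) ≠ k)]
      have e2 : (stB.1 ++ [(pvMJ (pvC P stB.1 (m+1)) m).1]).getD k 0 = stB.1.getD k 0 := by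
        simp [List.getD_eq_getElem?_getD, List.getElem?_append_left (show k < stB.1.length by omega)]
      rw [e1, hdp, if_pos (by omega), if_pos (by omega), e2]
    · rw [hk]
      have hlen : m+1 < stA.1.length := by omega
      have e1 : (stA.1.set (m+1) (some (pvMJ (pvC P stB.1 (m+1)) m).1)).getD (m+1) none
          = some (pvMJ (pvC P stB.1 (m+1)) m).1 := by
        simp [List.getD_eq_getElem?_getD, hlen]
      have e2 : (stB.1 ++ [(pvMJ (pvC P stB.1 (m+1)) m).1]).getD (m+1) 0
          = (pvMJ (pvC P stB.1 (m+1)) m).1 := by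
        rw [← hB1]
        simp [List.getD_eq_getElem?_getD]
      rw [e1, if_pos (by omega), e2]
    · have e1 : (stA.1.set (m+1) (some (pvMJ (pvC P stB.1 (m+1)) m).1)).getD k none
          = stA.1.getD k none := by
        simp [List.getD_eq_getElem?_getD, List.getElem?_set_ne (by omega : (m+1) ≠ k)]
      rw [e1, hdp, if_neg (by omega), if_neg (by omega)]
  · intro k
    rcases Nat.lt_trichotomy k (m+1) with hk|hk|hk
    · have e1 : (stA.2.set (m+1) (pvMJ (pvC P stB.1 (m+1)) m).2).getD k 0 = stA.2.getD k 0 := by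
        simp [List.getD_eq_getElem?_getD, List.getElem?_set_ne (by omega : (m+1) ≠ k)]
      have e2 : (stB.2 ++ [(pvMJ (pvC P stB.1 (m+1)) m).2]).getD k 0 = stB.2.getD k 0 := by
        simp [List.getD_eq_getElem?_getD, List.getElem?_append_left (show k < stB.2.length by omega)]
      rw [e1, e2, hseg]
    · rw [hk]
      have hlen : m+1 < stA.2.length := by omega
      have e1 : (stA.2.set (m+1) (pvMJ (pvC P stB.1 (m+1)) m).2).getD (m+1) 0
          = (pvMJ (pvC P stB.1 (m+1)) m).2 := by
        simp [List.getD_eq_getElem?_getD, hlen]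
      have e2 : (stB.2 ++ [(pvMJ (pvC P stB.1 (m+1)) m).2]).getD (m+1) 0
          = (pvMJ (pvC P stB.1 (m+1)) m).2 := by
        rw [← hB2]
        simp [List.getD_eq_getElem?_getD]
      rw [e1, e2]
    · have e1 : (stA.2.set (m+1) (pvMJ (pvC P stB.1 (m+1)) m).2).getD k 0 = stA.2.getD k 0 := by
        simp [List.getD_eq_getElem?_getD, List.getElem?_set_ne (by omega : (m+1) ≠ k)]
      have e2 : (stB.2 ++ [(pvMJ (pvC P stB.1 (m+1)) m).2]).getD k 0 = 0 := by
        apply List.getD_eq_default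
        simp [hB2]; omega
      rw [e1, e2, hseg]
      exact List.getD_eq_default _ _ (by omega)

lemma pvOuterSim (P : List Int) : ∀ (m : Nat), m ≤ P.length →
    pvInv P.length m
      ((List.range m).foldl (fun (st : List (Option Int) × List Nat) i' =>
        let i := i' + 1
        (List.range i).foldl (fun (st : List (Option Int) × List Nat) (j : Nat) =>
          let dp := st.1
          let seg := st.2
          let bs := calculate_bits (PySem.List.slice P (some (j : Int)) (some (i : Int)))
          let cand := pvOAdd (dp.getD j none) bs.1
          if pvOLt cand (dp.getD i none) then (dp.set i cand, seg.set i j) else st) st)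
        (some 0 :: List.replicate P.length none, List.replicate (P.length + 1) 0))
      ((List.range m).foldl (fun (st : List Int × List Nat) i' =>
        let i := i' + 1
        let r := pvInnerB P st.1 i i (P.getD (i - 1) 0) none 0
        (st.1 ++ [r.1.getD 0], st.2 ++ [r.2])) ([0], [0])) := by
  intro m
  induction m with
  | zero =>
    intro _
    simp only [List.range_zero, List.foldl_nil]
    refine ⟨by simp, by simp, rfl, rfl, ?_, ?_⟩
    · intro k
      cases k with
      | zero => rfl
      | succ k =>
        rw [if_neg (by omega)]
        show (List.replicate P.length (none : Option Int)).getD k none = none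
        simp [List.getD_eq_getElem?_getD, List.getElem?_replicate]
        split <;> rfl
    · intro k
      cases k with
      | zero => rfl
      | succ k =>
        show (List.replicate P.length (0 : Nat)).getD k 0 = ([] : List Nat).getD k 0
        simp [List.getD_eq_getElem?_getD, List.getElem?_replicate]
        split <;> rfl
  | succ m ih =>
    intro hm1
    rw [List.range_succ, List.foldl_append, List.foldl_append, List.foldl_cons,
      List.foldl_cons, List.foldl_nil, List.foldl_nil]
    exact pvStep P m _ _ hm1 (ih (by omega))

lemma pvRebuildBAcc (P : List Int) (seg : List Nat) :
    ∀ (fuel i : Nat) (acc : List (List Int)),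
    pvRebuildB P seg fuel i acc = acc ++ pvRebuildB P seg fuel i [] := by
  intro fuel
  induction fuel with
  | zero => intro i acc; simp [pvRebuildB]
  | succ f ih =>
    intro i acc
    by_cases h : 0 < i
    · have stepL : ∀ (a : List (List Int)), pvRebuildB P seg (f+1) i a
          = if 0 < i then pvRebuildB P seg f (seg.getD i 0)
              (a ++ [PySem.List.slice P (some ((seg.getD i 0 : Nat) : Int)) (some (i : Int))]) else a := by
        intro a; rfl
      rw [stepL, stepL, if_pos h, if_pos h, ih, List.nil_append,
        ih (seg.getD i 0) [PySem.List.slice P (some ((seg.getD i 0 : Nat) : Int)) (some (i : Int))],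
        List.append_assoc]
    · have stepL : ∀ (a : List (List Int)), pvRebuildB P seg (f+1) i a
          = if 0 < i then pvRebuildB P seg f (seg.getD i 0)
              (a ++ [PySem.List.slice P (some ((seg.getD i 0 : Nat) : Int)) (some (i : Int))]) else a := by
        intro a; rfl
      rw [stepL, stepL, if_neg h, if_neg h, List.append_nil]

lemma pvRebuildEq (P : List Int) (segA segB : List Nat) (h : ∀ k, segA.getD k 0 = segB.getD k 0) :
    ∀ (fuel i : Nat) (acc : List (List Int)),
    pvRebuildA P segA fuel i acc = (pvRebuildB P segB fuel i []).reverse ++ acc := by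
  intro fuel
  induction fuel with
  | zero => intro i acc; simp [pvRebuildA, pvRebuildB]
  | succ f ih =>
    intro i acc
    by_cases hi : 0 < i
    · have stepA : pvRebuildA P segA (f+1) i acc
          = pvRebuildA P segA f (segA.getD i 0)
              (PySem.List.slice P (some ((segA.getD i 0 : Nat) : Int)) (some (i : Int)) :: acc) := by
        rw [pvRebuildA.eq_def]
        simp only [if_pos hi]
      have stepB : pvRebuildB P segB (f+1) i []
          = pvRebuildB P segB f (segB.getD i 0)
              ([] ++ [PySem.List.slice P (some ((segB.getD i 0 : Nat) : Int)) (some (i : Int))]) := by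
        rw [pvRebuildB.eq_def]
        simp only [if_pos hi]
      rw [stepA, stepB, List.nil_append, ih,
        pvRebuildBAcc P segB f (segB.getD i 0)
          [PySem.List.slice P (some ((segB.getD i 0 : Nat) : Int)) (some (i : Int))],
        h i]
      simp [List.append_assoc]
    · have stepA : pvRebuildA P segA (f+1) i acc = acc := by
        rw [pvRebuildA.eq_def]; simp only [if_neg hi]
      have stepB : pvRebuildB P segB (f+1) i [] = [] := by
        rw [pvRebuildB.eq_def]; simp only [if_neg hi]
      rw [stepA, stepB]
      simp

lemma pvFinish (P : List Int) (stA : List (Option Int) × List Nat) (stB : List Int × List Nat)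
    (h : pvInv P.length P.length stA stB) :
    (pvRebuildA P stA.2 (P.length + 1) P.length [], (stA.1.getD P.length none).getD 0)
      = ((pvRebuildB P stB.2 (P.length + 1) P.length []).reverse,
         stB.1.getD (stB.1.length - 1) 0) := by
  obtain ⟨hA1, hA2, hB1, hB2, hdp, hseg⟩ := h
  have h1 : pvRebuildA P stA.2 (P.length + 1) P.length []
      = (pvRebuildB P stB.2 (P.length + 1) P.length []).reverse := by
    rw [pvRebuildEq P stA.2 stB.2 hseg (P.length + 1) P.length []]
    simp
  have h2 : (stA.1.getD P.length none).getD 0 = stB.1.getD (stB.1.length - 1) 0 := by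
    rw [hdp P.length, if_pos le_rfl, hB1]
    simp
  rw [h1, h2]

-- ===== VERDICT (by name: the statement is the Claim_ definition above) =====
theorem optimal_segmentation_spec : Claim_equal_optimal_segmentation := by
  intro P _
  show optimal_segmentation P = optimal_segmentation_alt P
  exact pvFinish P
    ((List.range P.length).foldl (fun (st : List (Option Int) × List Nat) i' =>
      let i := i' + 1
      (List.range i).foldl (fun (st : List (Option Int) × List Nat) (j : Nat) =>
        let dp := st.1
        let seg := st.2
        let bs := calculate_bits (PySem.List.slice P (some (j : Int)) (some (i : Int)))
        let cand := pvOAdd (dp.getD j none) bs.1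
        if pvOLt cand (dp.getD i none) then (dp.set i cand, seg.set i j) else st) st)
      (some 0 :: List.replicate P.length none, List.replicate (P.length + 1) 0))
    ((List.range P.length).foldl (fun (st : List Int × List Nat) i' =>
      let i := i' + 1
      let r := pvInnerB P st.1 i i (P.getD (i - 1) 0) none 0
      (st.1 ++ [r.1.getD 0], st.2 ++ [r.2])) ([0], [0]))
    (pvOuterSim P P.length le_rfl)
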